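-- pv_equiv track=rewrite | github.com/Flavoris/Genomancer-App | exporters.py | wrap_origin
-- ===== SOURCE A (Python) =====
-- def wrap_origin(seq: str) -> str:
--     """
--     Format sequence for GenBank ORIGIN section.
--     60 nucleotides per line, grouped in 10-nt blocks, with 1-based index.
--
--     Args:
--         seq: DNA sequence
--
--     Returns:
--         Formatted ORIGIN section lines
--     """
--     out = []
--     for i in range(0, len(seq), 60):
--         line = seq[i:i+60].lower()
--         idx = f"{i+1:>9}"
--         # Group into 10-nt blocks
--         blocks = " ".join(line[j:j+10] for j in range(0, len(line), 10))
--         out.append(f"{idx} {blocks}")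
--     return "\n".join(out)
-- ===== SOURCE B (Python) =====
-- def wrap_origin(seq: str) -> str:
--     s = seq.lower()
--     blocks = [s[j:j + 10] for j in range(0, len(s), 10)]
--     nlines = (len(blocks) + 5) // 6
--     return "\n".join(
--         f"{k * 60 + 1:>9} " + " ".join(blocks[6 * k:6 * k + 6])
--         for k in range(nlines)
--     )
-- ===== Notes on version B (the rewrite author's own statement) =====
-- stated objective: alternative
-- what changed: A slices 60-char lines and re-splits each line into 10-nt blocks in a nested loop; B lowercases once, builds a single flat list of 10-nt blocks of the whole sequence, and forms each output line by regrouping six consecutive blocks with a line count computed arithmetically from the block count.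
import Mathlib
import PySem

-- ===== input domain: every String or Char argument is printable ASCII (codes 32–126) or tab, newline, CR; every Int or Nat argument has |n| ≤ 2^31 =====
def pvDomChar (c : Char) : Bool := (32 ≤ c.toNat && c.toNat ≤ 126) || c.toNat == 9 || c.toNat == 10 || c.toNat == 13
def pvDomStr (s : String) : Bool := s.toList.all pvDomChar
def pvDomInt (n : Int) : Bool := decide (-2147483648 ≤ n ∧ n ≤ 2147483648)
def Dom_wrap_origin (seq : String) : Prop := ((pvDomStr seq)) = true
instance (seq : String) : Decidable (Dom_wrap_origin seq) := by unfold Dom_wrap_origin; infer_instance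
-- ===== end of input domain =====

-- B regroups one flat list of 10-nt blocks six at a time (line count computed from the
-- block count) instead of A's nested per-line re-splitting; objective: alternative decomposition.

-- f"{m:>9}": str(m) left-padded with spaces to width 9 (shared formatting helper)
def pvPad9 (m : Int) : List Char :=
  let ds := PySem.Int.toChars m
  List.replicate (9 - ds.length) ' ' ++ ds

-- ===== PORT A =====
def wrap_origin (seq : String) : String :=
  let s := seq.toList
  let out : List (List Char) :=
    (PySem.List.pyRange 0 (s.length : Int) 60).foldl (fun out i =>
      let line := PySem.Chars.lower (PySem.List.slice s (some i) (some (i + 60)))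
      let idx := pvPad9 (i + 1)
      let blocks := PySem.Chars.join [' ']
        ((PySem.List.pyRange 0 (line.length : Int) 10).map
          (fun j => PySem.List.slice line (some j) (some (j + 10))))
      out ++ [idx ++ [' '] ++ blocks]) []
  String.mk (PySem.Chars.join ['\n'] out)

-- ===== PORT B =====
def wrap_origin_alt (seq : String) : String :=
  let s := PySem.Chars.lower seq.toList
  let blocks : List (List Char) :=
    (PySem.List.pyRange 0 (s.length : Int) 10).map
      (fun j => PySem.List.slice s (some j) (some (j + 10)))
  let nlines := PySem.Int.floordiv ((blocks.length : Int) + 5) 6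
  let lines := (PySem.List.pyRange 0 nlines 1).map (fun k =>
      pvPad9 (k * 60 + 1) ++ [' '] ++
        PySem.Chars.join [' '] (PySem.List.slice blocks (some (6 * k)) (some (6 * k + 6))))
  String.mk (PySem.Chars.join ['\n'] lines)

-- ===== PRECONDITION & SPEC =====
def Spec_wrap_origin (seq : String) (out : String) : Prop := out = wrap_origin_alt seq
instance (seq : String) (out : String) : Decidable (Spec_wrap_origin seq out) := by unfold Spec_wrap_origin; infer_instance

-- ===== CLAIM (what is proved, stated in full; the proofs are below) =====
def Claim_equal_wrap_origin : Prop := ∀ (seq : String), Dom_wrap_origin seq → Spec_wrap_origin seq (wrap_origin seq)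

-- ===== LEMMAS AND PROOFS =====

-- appending singletons in a foldl is a map
lemma pv_foldl_snoc {α β : Type} (f : α → β) (l : List α) (acc : List β) :
    l.foldl (fun a x => a ++ [f x]) acc = acc ++ l.map f := by
  induction l generalizing acc with
  | nil => simp
  | cons x xs ih => simp [ih]

-- lowercasing commutes with slicing
lemma pv_lower_slice (s : List Char) (a b : Int) :
    PySem.Chars.lower (PySem.List.slice s (some a) (some b)) =
      PySem.List.slice (PySem.Chars.lower s) (some a) (some b) := by
  simp [PySem.Chars.lower, PySem.List.slice, List.map_take, List.map_drop]

lemma pv_lower_length (s : List Char) :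
    (PySem.Chars.lower s).length = s.length := by
  simp [PySem.Chars.lower]

-- range(0, n, 60) in Nat form
lemma pv_pyRange60 (n : Nat) :
    PySem.List.pyRange 0 (n : Int) 60 =
      (List.range ((n + 59) / 60)).map (fun k => ((60 * k : Nat) : Int)) := by
  rw [PySem.List.pyRange_of_pos 0 (n : Int) (by norm_num : (0:Int) < 60)]
  have hc : (if (0:Int) < (n : Int) then (((n : Int) - 0 + 60 - 1) / 60).toNat else 0)
      = (n + 59) / 60 := by
    split_ifs with h <;> omega
  rw [hc]
  exact List.map_congr_left (fun k _ => by push_cast; ring)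

-- range(0, n, 10) in Nat form
lemma pv_pyRange10 (n : Nat) :
    PySem.List.pyRange 0 (n : Int) 10 =
      (List.range ((n + 9) / 10)).map (fun k => ((10 * k : Nat) : Int)) := by
  rw [PySem.List.pyRange_of_pos 0 (n : Int) (by norm_num : (0:Int) < 10)]
  have hc : (if (0:Int) < (n : Int) then (((n : Int) - 0 + 10 - 1) / 10).toNat else 0)
      = (n + 9) / 10 := by
    split_ifs with h <;> omega
  rw [hc]
  exact List.map_congr_left (fun k _ => by push_cast; ring)

-- xs[60k : 60k+60] as drop/take
lemma pv_slice60 {α : Type} (xs : List α) (k : Nat) :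
    PySem.List.slice xs (some ((60 * k : Nat) : Int)) (some (((60 * k : Nat) : Int) + 60)) =
      (xs.drop (60 * k)).take 60 := by
  have h := PySem.List.slice_natCast_add xs (60 * k) 60
  simpa using h

-- xs[10j : 10j+10] as drop/take
lemma pv_slice10 {α : Type} (xs : List α) (j : Nat) :
    PySem.List.slice xs (some ((10 * j : Nat) : Int)) (some (((10 * j : Nat) : Int) + 10)) =
      (xs.drop (10 * j)).take 10 := by
  have h := PySem.List.slice_natCast_add xs (10 * j) 10
  simpa using h

-- xs[6k : 6k+6] as drop/take (bounds written as Python B computes them)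
lemma pv_slice6 {α : Type} (xs : List α) (k : Nat) :
    PySem.List.slice xs (some (6 * (k : Int))) (some (6 * (k : Int) + 6)) =
      (xs.drop (6 * k)).take 6 := by
  have h := PySem.List.slice_natCast_add xs (6 * k) 6
  push_cast at h
  simpa using h

-- (a + 5) // 6 on a nonnegative int is Nat division
lemma pv_floordiv6 (a : Nat) :
    PySem.Int.floordiv ((a : Int) + 5) 6 = (((a + 5) / 6 : Nat) : Int) := by
  exact (PySem.Int.floordiv_eq_iff_of_pos (by norm_num)).mpr (by constructor <;> omega)

-- the 10-blocks of line k of t are blocks 6k..6k+6 of t's flat 10-block list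
lemma pv_chunk_eq (t : List Char) (k : Nat) :
    (List.range ((((t.drop (60 * k)).take 60).length + 9) / 10)).map
        (fun j => (((t.drop (60 * k)).take 60).drop (10 * j)).take 10)
      = (((List.range ((t.length + 9) / 10)).map
            (fun j => (t.drop (10 * j)).take 10)).drop (6 * k)).take 6 := by
  apply List.ext_getElem
  · simp only [List.length_take, List.length_drop, List.length_map, List.length_range]
    omega
  · intro i h1 h2
    have hi6 : i < 6 := by
      simp only [List.length_take, List.length_drop, List.length_map, List.length_range] at h2
      omega
    simp only [List.getElem_take, List.getElem_drop, List.getElem_map, List.getElem_range]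
    rw [List.drop_take, List.drop_drop, List.take_take]
    congr 1
    · omega
    · congr 1
      omega

theorem pv_main (seq : String) : wrap_origin seq = wrap_origin_alt seq := by
  unfold wrap_origin wrap_origin_alt
  simp only [pv_foldl_snoc, List.nil_append, pv_lower_slice, pv_lower_length]
  generalize hT : PySem.Chars.lower seq.toList = t
  have hn : seq.toList.length = t.length := by rw [← hT]; exact (pv_lower_length _).symm
  rw [hn]
  simp only [pv_pyRange60, pv_pyRange10, List.length_map,
    List.length_range, pv_floordiv6, PySem.List.pyRange_one, sub_zero, Int.toNat_natCast,
    zero_add, List.map_map, Function.comp_def, pv_slice60, pv_slice10, pv_slice6]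
  congr 1
  congr 1
  have hLM : (t.length + 59) / 60 = (((t.length + 9) / 10 + 5) / 6) := by omega
  rw [hLM]
  apply List.map_congr_left
  intro k _
  have e1 : (((60 * k : Nat) : Int) + 1) = ((k : Int) * 60 + 1) := by push_cast; ring
  rw [e1, pv_chunk_eq]

-- ===== VERDICT (by name: the statement is the Claim_ definition above) =====
theorem wrap_origin_spec : Claim_equal_wrap_origin := by
  intro seq _
  exact pv_main seq
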